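-- pv_equiv track=rewrite | github.com/AV3S-NTF/Logia | etap2/Ex2_LOGIA13.py | kiedy
-- ===== SOURCE A (Python) =====
-- def slide(position, shelf, slideDistance):
--     returnPosition = position
--
--     for i in range(0, slideDistance):
--         if (returnPosition % shelf != 0):
--             returnPosition -= 1
--
--     return returnPosition
--
-- def kiedy(x, y, z):
--     days = 0
--
--     position = 0
--
--     while (position < 1000):
--         position += x
--         position = slide(position, z, y)
--         days += 1
--
--     return days
-- ===== SOURCE B (Python) =====
-- def kiedy(x, y, z):
--     # Same daily loop, but the per-day slide is a closed form instead of an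
--     # O(y) inner loop: sliding moves down to the nearest multiple of |z|,
--     # but at most y steps.
--     days = 0
--     position = 0
--     while position < 1000:
--         position += x
--         if y > 0:
--             position -= min(y, position % abs(z))
--         days += 1
--     return days
-- ===== Notes on version B (the rewrite author's own statement) =====
-- stated objective: alternative
-- what changed: The inner slide loop (up to y single-step decrements per day) is replaced by its closed form: each day the position drops by min(y, position % |z|), removing the O(y) inner scan.
import Mathlib
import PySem

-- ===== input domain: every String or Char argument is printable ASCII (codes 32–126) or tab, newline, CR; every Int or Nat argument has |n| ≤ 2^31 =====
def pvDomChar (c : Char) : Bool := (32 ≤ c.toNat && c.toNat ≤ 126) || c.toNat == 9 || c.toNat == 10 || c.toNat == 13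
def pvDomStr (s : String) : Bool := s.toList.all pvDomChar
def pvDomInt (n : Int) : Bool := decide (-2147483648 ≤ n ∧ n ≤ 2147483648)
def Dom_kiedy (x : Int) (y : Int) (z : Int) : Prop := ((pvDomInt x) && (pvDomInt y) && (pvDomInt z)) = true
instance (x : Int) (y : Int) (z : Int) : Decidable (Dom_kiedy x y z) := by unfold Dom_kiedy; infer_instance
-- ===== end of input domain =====

-- B replaces A's step-by-step inner slide loop with its closed form
-- (drop by min(y, position % |z|) per day), removing the inner loop.

-- ===== PORT A =====
-- for i in range(0, slideDistance): if returnPosition % shelf != 0: returnPosition -= 1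
def slideA (shelf : Int) : Nat → Int → Int
  | 0, p => p
  | n + 1, p => if PySem.Int.mod p shelf ≠ 0 then slideA shelf n (p - 1) else slideA shelf n p

-- while position < 1000: …  — fuel-bounded transcription; under Pre_kiedy the
-- position rises by at least 1 per day, so 1001 fuel always suffices.
def kiedyLoopA (x y z : Int) : Nat → Int → Int → Int
  | 0, _, days => days
  | f + 1, p, days =>
      if p < 1000 then kiedyLoopA x y z f (slideA z y.toNat (p + x)) (days + 1) else days

def kiedy (x : Int) (y : Int) (z : Int) : Int := kiedyLoopA x y z 1001 0 0

-- ===== PORT B =====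
-- position += x; if y > 0: position -= min(y, position % abs(z))
def stepB (x y z p : Int) : Int :=
  let q := p + x
  if 0 < y then q - min y (PySem.Int.mod q |z|) else q

def kiedyLoopB (x y z : Int) : Nat → Int → Int → Int
  | 0, _, days => days
  | f + 1, p, days =>
      if p < 1000 then kiedyLoopB x y z f (stepB x y z p) (days + 1) else days

def kiedy_alt (x : Int) (y : Int) (z : Int) : Int := kiedyLoopB x y z 1001 0 0

-- ===== PRECONDITION & SPEC =====
-- Pre_ is exactly where A terminates without an exception: with z = 0 the slide
-- loop must not run (y ≤ 0, else ZeroDivisionError) and x > 0 must drive the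
-- position up; with z ≠ 0 the daily gain x - min(max y 0, |z| - 1) must be
-- positive, otherwise the position is stuck at 0 or sinks and A loops forever.
def Pre_kiedy (x : Int) (y : Int) (z : Int) : Prop :=
  (z = 0 ∧ y ≤ 0 ∧ 0 < x) ∨ (z ≠ 0 ∧ min (max y 0) (|z| - 1) < x)
instance (x : Int) (y : Int) (z : Int) : Decidable (Pre_kiedy x y z) := by
  unfold Pre_kiedy; infer_instance

def pvWitness_kiedy : Int × Int × Int := (7, 5, 3)

def Spec_kiedy (x : Int) (y : Int) (z : Int) (out : Int) : Prop := out = kiedy_alt x y z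
instance (x : Int) (y : Int) (z : Int) (out : Int) : Decidable (Spec_kiedy x y z out) := by
  unfold Spec_kiedy; infer_instance

-- ===== CLAIM (what is proved, stated in full; the proofs are below) =====
def Claim_equal_kiedy : Prop :=
  ∀ (x : Int) (y : Int) (z : Int), Dom_kiedy x y z → Pre_kiedy x y z → Spec_kiedy x y z (kiedy x y z)

-- ===== LEMMAS AND PROOFS =====

-- A's slide loop in closed form: it walks down to the nearest multiple of |z|,
-- at most n steps.
theorem slideA_closed (z : Int) (hz : z ≠ 0) :
    ∀ (n : Nat) (p : Int), slideA z n p = p - min (n : Int) (PySem.Int.mod p |z|) := by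
  have hpos : (0 : Int) < |z| := abs_pos.mpr hz
  intro n
  induction n with
  | zero =>
      intro p
      have h0 : (0 : Int) ≤ PySem.Int.mod p |z| := PySem.Int.mod_nonneg p hpos
      simp [slideA]
      omega
  | succ n ih =>
      intro p
      have hmod : PySem.Int.mod p z = 0 ↔ PySem.Int.mod p |z| = 0 := by
        rw [PySem.Int.mod_eq_zero_iff_dvd, PySem.Int.mod_eq_zero_iff_dvd, abs_dvd]
      have hr0 : (0 : Int) ≤ PySem.Int.mod p |z| := PySem.Int.mod_nonneg p hpos
      by_cases h : PySem.Int.mod p z = 0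
      · have hr : PySem.Int.mod p |z| = 0 := hmod.mp h
        simp [slideA, h, ih, hr]
        omega
      · have hr : PySem.Int.mod p |z| ≠ 0 := fun c => h (hmod.mpr c)
        have hem : PySem.Int.mod p |z| = p % |z| := PySem.Int.mod_eq_emod_of_pos hpos
        have hem' : PySem.Int.mod (p - 1) |z| = (p - 1) % |z| :=
          PySem.Int.mod_eq_emod_of_pos hpos
        have hlt : p % |z| < |z| := Int.emod_lt_of_pos p hpos
        have hge : 1 ≤ p % |z| := by omega
        have hstep : (p - 1) % |z| = p % |z| - 1 := by
          have hdecomp : p - 1 = (p % |z| - 1) + |z| * (p / |z|) := by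
            have := Int.emod_add_mul_ediv p |z|; omega
          rw [hdecomp, Int.add_mul_emod_self_left]
          exact Int.emod_eq_of_lt (by omega) (by omega)
        simp [slideA, h, ih]
        rw [hem', hstep, hem]
        omega

-- Under Pre_, A's daily body equals B's closed-form step.
theorem step_eq (x y z p : Int) (hpre : Pre_kiedy x y z) :
    slideA z y.toNat (p + x) = stepB x y z p := by
  rcases hpre with ⟨hz, hy, _⟩ | ⟨hz, _⟩
  · have : y.toNat = 0 := by omega
    simp [this, slideA, stepB, show ¬ (0 : Int) < y by omega]
  · have hpos : (0 : Int) < |z| := abs_pos.mpr hz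
    have hr0 : (0 : Int) ≤ PySem.Int.mod (p + x) |z| := PySem.Int.mod_nonneg _ hpos
    rw [slideA_closed z hz]
    by_cases hy : 0 < y
    · have : ((y.toNat : Int)) = y := by omega
      simp [stepB, hy, this]
    · have : y.toNat = 0 := by omega
      simp [stepB, hy, this]
      omega

theorem loop_eq (x y z : Int) (hpre : Pre_kiedy x y z) :
    ∀ (f : Nat) (p days : Int), kiedyLoopA x y z f p days = kiedyLoopB x y z f p days := by
  intro f
  induction f with
  | zero => intro p days; rfl
  | succ f ih =>
      intro p days
      simp only [kiedyLoopA, kiedyLoopB, step_eq x y z p hpre]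
      split <;> [exact ih _ _; rfl]

-- ===== VERDICT (by name: the statement is the Claim_ definition above) =====
theorem kiedy_spec : Claim_equal_kiedy := by
  intro x y z _ hpre
  unfold Spec_kiedy kiedy kiedy_alt
  exact loop_eq x y z hpre 1001 0 0
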